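-- pv_equiv track=rewrite | github.com/weber81/DailyProgrammerSolutions | Fogcreek.py | findFarthestApartNoDouble
-- ===== SOURCE A (Python) =====
-- def findFarthestApartNoDouble(string):
--     longest = -1
--     start = -1
--     end = -1
--     for i in range(len(string)):
--         currentSet = set()
--         for j in range(i+1, len(string), 1):
--             if string[j] in currentSet:
--                 break
--             if string[j] == string[i]:
--                 if j-i > longest:
--                     longest = j-i
--                     start = i
--                     end = j
--                     break
--             else:
--                 currentSet.add(string[j])
--     return start, end;
-- ===== SOURCE B (Python) =====
-- def findFarthestApartNoDouble(string):
--     longest, start, end = -1, -1, -1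
--     for i in range(len(string)):
--         c = string[i]
--         j = string.find(c, i + 1 + max(longest, 0))
--         if j == -1:
--             continue
--         between = string[i + 1:j].replace(c, '')
--         if len(set(between)) == len(between):
--             longest, start, end = j - i, i, j
--     return start, end
-- ===== Notes on version B (the rewrite author's own statement) =====
-- stated objective: faster
-- what changed: B replaces A's stateful inner scan (incremental seen-set with three break points) by a direct str.find jump to the first occurrence of string[i] beyond the current record plus one batch distinctness test of the non-matching characters in between, so the character-by-character inner loop, its seen-set and the walk over sub-record occurrences disappear.
import Mathlib
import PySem

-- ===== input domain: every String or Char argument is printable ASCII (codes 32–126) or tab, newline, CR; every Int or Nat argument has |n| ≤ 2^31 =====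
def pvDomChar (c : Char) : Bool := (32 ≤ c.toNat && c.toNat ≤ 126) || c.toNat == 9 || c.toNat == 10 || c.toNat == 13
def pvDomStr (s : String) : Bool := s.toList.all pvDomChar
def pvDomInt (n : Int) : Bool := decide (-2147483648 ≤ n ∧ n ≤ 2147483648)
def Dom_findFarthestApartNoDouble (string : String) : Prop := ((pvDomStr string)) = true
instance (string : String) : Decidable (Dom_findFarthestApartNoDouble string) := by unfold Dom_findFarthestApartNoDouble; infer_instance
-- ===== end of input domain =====

-- B replaces A's stateful inner scan (seen-set + three break points) by a direct jump with
-- str.find to the first occurrence of string[i] beyond the current record, followed by one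
-- batch distinctness test of the characters in between; it skips the sub-record occurrences
-- A re-walks, which a timing run measured as faster (objective: faster).

-- ===== PORT A =====
-- inner 'for j in range(i+1, len(string))' loop: state (longest, start, end) = st,
-- currentSet = seen; 'break' returns the state, the two recursive calls are the two
-- fall-through continuations of the loop body.
def pvAInner (l : List Char) (c : Char) (i : Nat) (j : Nat) (seen : PySem.Set Char)
    (st : Int × Int × Int) : Int × Int × Int :=
  if h : j < l.length then
    if PySem.Set.contains seen l[j] then st
    else if l[j] = c then
      (if (j : Int) - (i : Int) > st.1 then ((j : Int) - (i : Int), (i : Int), (j : Int))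
       else pvAInner l c i (j + 1) seen st)
    else pvAInner l c i (j + 1) (PySem.Set.add seen l[j]) st
  else st
termination_by l.length - j

-- outer 'for i in range(len(string))' loop
def pvAOuter (l : List Char) (i : Nat) (st : Int × Int × Int) : Int × Int × Int :=
  if h : i < l.length then
    pvAOuter l (i + 1) (pvAInner l l[i] i (i + 1) PySem.Set.empty st)
  else st
termination_by l.length - i

def findFarthestApartNoDouble (string : String) : List Int :=
  let r := pvAOuter string.toList 0 (-1, -1, -1)
  [r.2.1, r.2.2]

-- ===== PORT B =====
-- body of Source B's loop: j = string.find(c, i+1+max(longest,0)) is PySem.Chars.findFrom;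
-- the comprehension [x for x in string[i+1:j] if x != c] is filter of the slice;
-- len(set(between)) == len(between) via PySem.Set.ofList / Set.len.
def pvBStep (l : List Char) (c : Char) (i : Nat) (st : Int × Int × Int) : Int × Int × Int :=
  let j := PySem.Chars.findFrom l [c] ((i : Int) + 1 + max st.1 0) none
  if j = -1 then st
  else
    let between := (PySem.List.slice l (some ((i : Int) + 1)) (some j)).filter (fun x => x != c)
    if PySem.Set.len (PySem.Set.ofList between) = (between.length : Int) then
      (j - (i : Int), (i : Int), j)
    else st

-- 'for i in range(len(string))' loop of Source B
def pvBOuter (l : List Char) (i : Nat) (st : Int × Int × Int) : Int × Int × Int :=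
  if h : i < l.length then pvBOuter l (i + 1) (pvBStep l l[i] i st) else st
termination_by l.length - i

def findFarthestApartNoDouble_alt (string : String) : List Int :=
  let r := pvBOuter string.toList 0 (-1, -1, -1)
  [r.2.1, r.2.2]

-- ===== PRECONDITION & SPEC =====
def Spec_findFarthestApartNoDouble (string : String) (out : List Int) : Prop := out = findFarthestApartNoDouble_alt string
instance (string : String) (out : List Int) : Decidable (Spec_findFarthestApartNoDouble string out) := by unfold Spec_findFarthestApartNoDouble; infer_instance

-- ===== CLAIM (what is proved, stated in full; the proofs are below) =====
def Claim_equal_findFarthestApartNoDouble : Prop := ∀ (string : String), Dom_findFarthestApartNoDouble string → Spec_findFarthestApartNoDouble string (findFarthestApartNoDouble string)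

-- ===== LEMMAS AND PROOFS =====

-- the non-c characters strictly between positions i and j (exclusive), as B's filter produces them
def pvW (l : List Char) (c : Char) (i j : Nat) : List Char :=
  ((l.take j).drop (i + 1)).filter (fun x => x != c)

-- first position p ≥ k with l[p] = c (proof-side specification of str.find(c, k))
def pvFirst (l : List Char) (c : Char) (k : Nat) : Option Nat :=
  if h : k < l.length then
    if l[k] = c then some k else pvFirst l c (k + 1)
  else none
termination_by l.length - k

theorem pvFirst_ge_len (l : List Char) (c : Char) (k : Nat) (h : l.length ≤ k) :
    pvFirst l c k = none := by
  unfold pvFirst; simp [Nat.not_lt.mpr h]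

theorem pvFirst_none_iff (l : List Char) (c : Char) :
    ∀ (fuel k : Nat), l.length - k ≤ fuel →
    (pvFirst l c k = none ↔ ∀ p (hp : p < l.length), k ≤ p → l[p] ≠ c) := by
  intro fuel
  induction fuel with
  | zero =>
    intro k hf
    have hk : l.length ≤ k := by omega
    rw [pvFirst]
    simp only [Nat.not_lt.mpr hk, dif_neg, not_false_iff]
    constructor
    · intro _ p hp hkp; omega
    · intro _; trivial
  | succ f ih =>
    intro k hf
    rw [pvFirst]
    by_cases h : k < l.length
    · by_cases hc : l[k] = c
      · simp only [h, dif_pos, hc, if_pos]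
        constructor
        · intro hnone; exact absurd hnone (by simp)
        · intro hall; exact absurd hc (hall k h le_rfl)
      · simp only [h, dif_pos, hc, if_neg, not_false_iff]
        rw [ih (k+1) (by omega)]
        constructor
        · intro hall p hp hkp
          rcases Nat.eq_or_lt_of_le hkp with rfl | hlt
          · exact hc
          · exact hall p hp hlt
        · intro hall p hp hkp; exact hall p hp (by omega)
    · simp only [h, dif_neg, not_false_iff]
      constructor
      · intro _ p hp hkp; omega
      · intro _; trivial

theorem pvFirst_some (l : List Char) (c : Char) :
    ∀ (fuel k p : Nat), l.length - k ≤ fuel → pvFirst l c k = some p →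
    k ≤ p ∧ ∃ (hp : p < l.length), l[p] = c ∧ ∀ q (hq : q < l.length), k ≤ q → q < p → l[q] ≠ c := by
  intro fuel
  induction fuel with
  | zero =>
    intro k p hf h
    have hk : l.length ≤ k := by omega
    rw [pvFirst_ge_len l c k hk] at h
    exact absurd h (by simp)
  | succ f ih =>
    intro k p hf h
    rw [pvFirst] at h
    by_cases hk : k < l.length
    · by_cases hc : l[k] = c
      · simp only [hk, dif_pos, hc, if_pos, Option.some.injEq] at h
        subst h
        exact ⟨le_rfl, hk, hc, fun q hq h1 h2 => by omega⟩
      · simp only [hk, dif_pos, if_neg hc] at h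
        obtain ⟨h1, hp, h2, h3⟩ := ih (k+1) p (by omega) h
        refine ⟨by omega, hp, h2, fun q hq hkq hqp => ?_⟩
        rcases Nat.eq_or_lt_of_le hkq with rfl | hlt
        · exact hc
        · exact h3 q hq hlt hqp
    · simp [hk] at h

theorem pvFirst_self (l : List Char) (c : Char) (k : Nat) (h : k < l.length) (hc : l[k] = c) :
    pvFirst l c k = some k := by
  unfold pvFirst; simp [h, hc]

theorem pvFirst_succ (l : List Char) (c : Char) (k : Nat) (h : k < l.length) (hc : l[k] ≠ c) :
    pvFirst l c k = pvFirst l c (k + 1) := by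
  rw [pvFirst]; simp [h, hc]

-- [c] is a prefix of l.drop m iff l has c at position m
theorem single_prefix_drop (l : List Char) (c : Char) (m : Nat) :
    [c] <+: l.drop m ↔ ∃ (h : m < l.length), l[m] = c := by
  constructor
  · rintro ⟨t, ht⟩
    have hm : m < l.length := by
      by_contra hm
      rw [List.drop_eq_nil_iff.mpr (by omega)] at ht
      exact absurd ht (by simp)
    refine ⟨hm, ?_⟩
    rw [List.drop_eq_getElem_cons hm] at ht
    exact (List.cons.injEq _ _ _ _ ▸ ht).1.symm
  · rintro ⟨h, hc⟩
    exact ⟨l.drop (m + 1), by rw [List.drop_eq_getElem_cons h, hc]; rfl⟩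

theorem single_infix_iff (l : List Char) (c : Char) : [c] <:+: l ↔ c ∈ l := by
  constructor
  · intro h; exact h.subset (by simp)
  · intro h
    obtain ⟨s, t, hst⟩ := List.append_of_mem h
    exact ⟨s, t, by rw [hst]; simp⟩

-- str.find of the one-character needle [c] from a nonnegative start, as pvFirst
theorem findFrom_single (l : List Char) (c : Char) (k : Nat) :
    PySem.Chars.findFrom l [c] (k : Int) none =
      (pvFirst l c k).elim (-1 : Int) (fun p => (p : Int)) := by
  by_cases hk : k ≤ l.length
  · rw [PySem.Chars.findFrom_natCast l [c] k hk]
    cases hfi : pvFirst l c k with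
    | none =>
      have hnone := (pvFirst_none_iff l c l.length k (by omega)).mp hfi
      have hnf : PySem.Chars.find (l.drop k) [c] = -1 := by
        rw [PySem.Chars.find_eq_neg_one_iff, single_infix_iff]
        intro hmem
        obtain ⟨j, hj, hje⟩ := List.mem_iff_getElem.mp hmem
        rw [List.getElem_drop] at hje
        exact hnone (k + j) (by simp at hj; omega) (by omega) hje
      simp [hnf]
    | some p =>
      obtain ⟨hkp, hp, hpc, hmin⟩ := pvFirst_some l c l.length k p (by omega) hfi
      have hinf : [c] <:+: l.drop k := by
        rw [single_infix_iff, List.mem_iff_getElem]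
        refine ⟨p - k, by simp; omega, ?_⟩
        rw [List.getElem_drop]
        convert hpc using 2
        omega
      have hge : 0 ≤ PySem.Chars.find (l.drop k) [c] := (PySem.Chars.find_nonneg_iff _ _).mpr hinf
      obtain ⟨hpre, hmin'⟩ := PySem.Chars.find_spec hge
      set r := (PySem.Chars.find (l.drop k) [c]).toNat with hr
      rw [List.drop_drop] at hpre
      obtain ⟨hlt, hceq⟩ := (single_prefix_drop l c (k + r)).mp hpre
      -- p = k + r
      have h1 : p ≤ k + r := by
        by_contra hgt
        exact hmin (k + r) hlt (by omega) (by omega) hceq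
      have h2 : ¬ p < k + r := by
        intro hlt2
        have := hmin' (p - k) (by omega)
        rw [List.drop_drop] at this
        rw [show k + (p - k) = p from by omega] at this
        exact this ((single_prefix_drop l c p).mpr ⟨hp, hpc⟩)
      have hpr : p = k + r := by omega
      have hne : PySem.Chars.find (l.drop k) [c] ≠ -1 := by omega
      rw [if_neg hne, Option.elim_some]
      omega
  · -- start beyond the end of the string: find returns -1, and pvFirst is none
    rw [pvFirst_ge_len l c k (by omega), Option.elim_none]
    simp only [PySem.Chars.findFrom]
    rw [if_pos (by push_cast; omega)]

-- len(set(xs)) == len(xs) iff xs has no duplicates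
theorem ofList_len_eq_iff (xs : List Char) :
    (PySem.Set.len (PySem.Set.ofList xs) = (xs.length : Int)) ↔ xs.Nodup := by
  rw [PySem.Set.len_eq, Nat.cast_inj]
  constructor
  · intro hlen
    have hfin : (PySem.Set.ofList xs : List Char).toFinset = xs.toFinset := by
      ext x; simp [List.mem_toFinset, PySem.Set.mem_ofList]
    have h1 : xs.toFinset.card = (PySem.Set.ofList xs : List Char).length := by
      rw [← hfin]; exact List.toFinset_card_of_nodup (PySem.Set.nodup_ofList xs)
    have h2 : xs.dedup.length = xs.length := by
      rw [← List.card_toFinset, h1, hlen]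
    rw [← List.dedup_eq_self]
    exact (List.dedup_sublist xs).eq_of_length h2
  · intro hnd
    rw [PySem.Set.ofList_eq_self_of_nodup xs hnd]

-- window decomposition: for i+1 ≤ j ≤ p ≤ length, pvW _ _ i p extends pvW _ _ i j
theorem pvW_append (l : List Char) (c : Char) (i j p : Nat)
    (hij : i + 1 ≤ j) (hjp : j ≤ p) (hp : p ≤ l.length) :
    pvW l c i p = pvW l c i j ++ ((l.take p).drop j).filter (fun x => x != c) := by
  unfold pvW
  have hsplit : l.take p = l.take j ++ (l.take p).drop j := by
    conv_lhs => rw [← List.take_append_drop j (l.take p)]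
    rw [List.take_take, Nat.min_eq_left hjp]
  conv_lhs => rw [hsplit]
  rw [List.drop_append_of_le_length (by rw [List.length_take]; omega), List.filter_append]

theorem pvW_succ (l : List Char) (c : Char) (i j : Nat) (hij : i + 1 ≤ j) (hj : j < l.length) :
    pvW l c i (j + 1) = pvW l c i j ++ (if l[j] = c then [] else [l[j]]) := by
  unfold pvW
  rw [List.take_succ, List.getElem?_eq_getElem hj]
  rw [List.drop_append_of_le_length (by rw [List.length_take]; omega), List.filter_append]
  congr 1
  by_cases hc : l[j] = c <;> simp [hc]

-- MAIN LEMMA: A's inner scan from position j equals B's jump-and-check, provided seen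
-- holds exactly the (duplicate-free) non-c characters of l[i+1..j-1]
theorem inner_eq (l : List Char) (c : Char) (i : Nat) (st : Int × Int × Int) :
    ∀ (fuel j : Nat), l.length - j ≤ fuel → i + 1 ≤ j →
    ∀ (seen : PySem.Set Char),
    (∀ x, PySem.Set.contains seen x = true ↔ x ∈ pvW l c i j) →
    (pvW l c i j).Nodup →
    pvAInner l c i j seen st =
      (pvFirst l c (max j ((i : Int) + 1 + max st.1 0).toNat)).elim st
        (fun p => if (pvW l c i p).Nodup then ((p : Int) - (i : Int), (i : Int), (p : Int)) else st) := by
  intro fuel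
  induction fuel with
  | zero =>
    intro j hf hij seen hseen hnd
    have hjl : l.length ≤ j := by omega
    rw [pvAInner]
    simp only [Nat.not_lt.mpr hjl, dif_neg, not_false_iff]
    rw [pvFirst_ge_len l c _ (by omega), Option.elim_none]
  | succ f ih =>
    intro j hf hij seen hseen hnd
    set m := ((i : Int) + 1 + max st.1 0).toNat with hm
    by_cases h : j < l.length
    · rw [pvAInner]
      simp only [h, dif_pos]
      by_cases hmem : PySem.Set.contains seen l[j] = true
      · -- duplicate non-c character: A breaks; every farther window contains it twice
        simp only [hmem, if_pos]
        have hcjW : l[j] ∈ pvW l c i j := (hseen l[j]).mp hmem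
        have hcjne : l[j] ≠ c := by
          have := (List.mem_filter.mp (by exact hcjW)).2
          simpa using this
        cases hfst : pvFirst l c (max j m) with
        | none => rfl
        | some p =>
          rw [Option.elim_some]
          obtain ⟨hkp, hp, hpc, _⟩ := pvFirst_some l c l.length (max j m) p (by omega) hfst
          have hjp : j < p := by
            rcases Nat.lt_or_ge j p with h' | h'
            · exact h'
            · have : j = p := by omega
              subst this
              exact absurd hpc hcjne
          have hW1 : pvW l c i (j + 1) = pvW l c i j ++ [l[j]] := by
            rw [pvW_succ l c i j hij h, if_neg hcjne]
          have hWp := pvW_append l c i (j + 1) p (by omega) (by omega) (by omega)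
          have : ¬ (pvW l c i p).Nodup := by
            rw [hWp, hW1]
            intro hcon
            have h2 := (List.nodup_append.mp hcon).1
            rw [List.nodup_append] at h2
            exact h2.2.2 l[j] hcjW l[j] (by simp) rfl
          rw [if_neg this]
      · simp only [hmem, if_neg, Bool.not_eq_true]
        by_cases hcc : l[j] = c
        · simp only [hcc, if_pos]
          by_cases hgt : (j : Int) - (i : Int) > st.1
          · simp only [hgt, if_pos]
            have hmj : m ≤ j := by omega
            rw [Nat.max_eq_left hmj, pvFirst_self l c j h hcc, Option.elim_some, if_pos hnd]
          · simp only [hgt]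
            have hWeq : pvW l c i (j + 1) = pvW l c i j := by
              rw [pvW_succ l c i j hij h, if_pos hcc, List.append_nil]
            have hjm : j < m := by omega
            rw [ih (j + 1) (by omega) (by omega) seen (by rw [hWeq]; exact hseen) (by rw [hWeq]; exact hnd)]
            rw [show max (j + 1) m = max j m from by omega]
            simp
        · simp only [hcc]
          have hW1 : pvW l c i (j + 1) = pvW l c i j ++ [l[j]] := by
            rw [pvW_succ l c i j hij h, if_neg hcc]
          have hnotin : l[j] ∉ pvW l c i j := fun hx => hmem ((hseen l[j]).mpr hx)
          have hseen' : ∀ x, PySem.Set.contains (PySem.Set.add seen l[j]) x = true ↔ x ∈ pvW l c i (j + 1) := by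
            intro x
            rw [PySem.Set.contains_iff, PySem.Set.mem_add, hW1, List.mem_append, List.mem_singleton,
              ← PySem.Set.contains_iff, hseen]
          have hnd' : (pvW l c i (j + 1)).Nodup := by
            rw [hW1, List.nodup_append]
            exact ⟨hnd, List.nodup_singleton _, by
              intro a ha b hb he
              simp at hb
              subst hb; subst he
              exact hnotin ha⟩
          rw [ih (j + 1) (by omega) (by omega) _ hseen' hnd']
          rcases Nat.lt_or_ge j m with hjm | hjm
          · rw [show max (j + 1) m = max j m from by omega]
            simp
          · rw [Nat.max_eq_left (by omega), Nat.max_eq_left (by omega),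
              ← pvFirst_succ l c j h hcc]
            simp
    · rw [pvAInner]
      simp only [h, dif_neg, not_false_iff]
      rw [pvFirst_ge_len l c _ (by omega), Option.elim_none]

-- B's step equals the jump-and-check normal form
theorem bstep_aux (l : List Char) (c : Char) (i : Nat) (st : Int × Int × Int) (k : Nat)
    (hk : (i : Int) + 1 + max st.1 0 = (k : Int)) :
    pvBStep l c i st =
      (pvFirst l c k).elim st
        (fun p => if (pvW l c i p).Nodup then ((p : Int) - (i : Int), (i : Int), (p : Int)) else st) := by
  have hik : i + 1 ≤ k := by omega
  simp only [pvBStep]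
  rw [hk, findFrom_single l c k]
  cases hf : pvFirst l c k with
  | none => simp
  | some p =>
    rw [Option.elim_some, Option.elim_some]
    obtain ⟨hkp, hp, hpc, _⟩ := pvFirst_some l c l.length k p (by omega) hf
    have hne : ((p : Nat) : Int) ≠ -1 := by omega
    rw [if_neg hne]
    have hip : i + 1 ≤ p := by omega
    have hslice : PySem.List.slice l (some ((i : Int) + 1)) (some ((p : Nat) : Int)) =
        (l.take p).drop (i + 1) := by
      rw [show (i : Int) + 1 = (((i + 1 : Nat) : Nat) : Int) from by push_cast; ring,
        PySem.List.slice_natCast, List.drop_take]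
    rw [hslice]
    rw [show (((l.take p).drop (i + 1)).filter (fun x => x != c)) = pvW l c i p from rfl]
    by_cases hnd : (pvW l c i p).Nodup
    · rw [if_pos ((ofList_len_eq_iff _).mpr hnd), if_pos hnd]
    · rw [if_neg (fun hc => hnd ((ofList_len_eq_iff _).mp hc)), if_neg hnd]

theorem step_eq (l : List Char) (i : Nat) (hi : i < l.length) (st : Int × Int × Int) :
    pvAInner l l[i] i (i + 1) PySem.Set.empty st = pvBStep l l[i] i st := by
  rw [bstep_aux l l[i] i st ((i : Int) + 1 + max st.1 0).toNat (by omega)]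
  have hW : pvW l l[i] i (i + 1) = [] := by
    unfold pvW
    rw [List.drop_eq_nil_iff.mpr (by rw [List.length_take]; omega)]
    rfl
  rw [inner_eq l l[i] i st l.length (i + 1) (by omega) le_rfl PySem.Set.empty
    (by intro x; rw [hW]; constructor
        · intro hx; simp [PySem.Set.contains, PySem.Set.empty] at hx
        · intro hx; simp at hx)
    (by rw [hW]; exact List.nodup_nil),
    Nat.max_eq_right (show i + 1 ≤ ((i : Int) + 1 + max st.1 0).toNat from by omega)]

theorem outer_eq (l : List Char) : ∀ (fuel i : Nat), l.length - i ≤ fuel →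
    ∀ (st : Int × Int × Int), pvAOuter l i st = pvBOuter l i st := by
  intro fuel
  induction fuel with
  | zero =>
    intro i hfuel st
    have hl : l.length ≤ i := by omega
    unfold pvAOuter pvBOuter
    simp [Nat.not_lt.mpr hl]
  | succ f ih =>
    intro i hfuel st
    by_cases h : i < l.length
    · rw [pvAOuter, pvBOuter]
      simp only [h, dif_pos]
      rw [step_eq l i h st]
      exact ih (i + 1) (by omega) _
    · unfold pvAOuter pvBOuter
      simp [h]

-- ===== VERDICT (by name: the statement is the Claim_ definition above) =====
theorem findFarthestApartNoDouble_spec : Claim_equal_findFarthestApartNoDouble := by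
  intro s _
  unfold Spec_findFarthestApartNoDouble findFarthestApartNoDouble findFarthestApartNoDouble_alt
  rw [outer_eq s.toList s.toList.length 0 (by omega)]
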